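-- pv_equiv track=rewrite | github.com/DayNoone/AI_Programming | Project_2/Module_4/node.py | mergeLine
-- ===== SOURCE A (Python) =====
-- def mergeLine(line):
-- 	nonzeros_removed = []
-- 	result = []
-- 	merged = False
-- 	for number in line:
-- 		if number != 0:
-- 			nonzeros_removed.append(number)
--
-- 	while len(nonzeros_removed) != len(line):
-- 		nonzeros_removed.append(0)
--
-- 	# Double sequental tiles if same value
-- 	for number in range(0, len(nonzeros_removed) - 1):
-- 		if nonzeros_removed[number] != 0 and nonzeros_removed[number] == nonzeros_removed[
-- 					number + 1] and merged is False:
-- 			result.append(nonzeros_removed[number] + 1)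
-- 			merged = True
-- 		elif nonzeros_removed[number] != nonzeros_removed[number + 1] and merged is False:
-- 			result.append(nonzeros_removed[number])
-- 		elif merged is True:
-- 			merged = False
--
-- 	if nonzeros_removed[-1] != 0 and merged is False:
-- 		result.append(nonzeros_removed[-1])
--
-- 	while len(result) != len(nonzeros_removed):
-- 		result.append(0)
--
-- 	return result
-- ===== SOURCE B (Python) =====
-- from itertools import groupby
--
-- def mergeLine(line):
--     tiles = [x for x in line if x != 0]
--     out = []
--     for value, run in groupby(tiles):
--         k = len(list(run))
--         out.extend([value + 1] * (k // 2))
--         out.extend([value] * (k % 2))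
--     out.extend([0] * (len(line) - len(out)))
--     return out
-- ===== Notes on version B (the rewrite author's own statement) =====
-- stated objective: simpler
-- what changed: Replaces A's flag-driven pairwise index pass over the zero-padded list with a compact-then-groupby pass: each maximal run of k equal nonzero tiles emits k//2 merged tiles (value+1) plus k%2 originals, then zeros pad to the line length.
-- outside the precondition, e.g. on mergeLine([]): A raises IndexError, B returns []
import Mathlib
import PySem

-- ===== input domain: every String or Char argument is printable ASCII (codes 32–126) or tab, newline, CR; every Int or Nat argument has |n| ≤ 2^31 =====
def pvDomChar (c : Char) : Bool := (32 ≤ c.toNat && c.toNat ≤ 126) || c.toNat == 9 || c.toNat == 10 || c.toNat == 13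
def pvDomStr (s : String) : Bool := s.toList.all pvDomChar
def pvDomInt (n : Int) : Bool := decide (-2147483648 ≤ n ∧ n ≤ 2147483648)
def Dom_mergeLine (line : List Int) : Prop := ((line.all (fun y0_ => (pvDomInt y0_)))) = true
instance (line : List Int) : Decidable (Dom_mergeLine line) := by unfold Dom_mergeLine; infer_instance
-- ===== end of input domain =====

-- B replaces A's flag-driven pairwise pass with a compact-then-group-runs pass (objective: simpler).


-- ===== PORT A =====
-- A's main for-loop over indices 0..len-2 plus the final [-1] check, transcribed
-- as the obvious structural recursion over consecutive elements with the same
-- (merged-flag) state; branches in the source order.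
def mergeLoopA : List Int → Bool → List Int
  | [], _ => []
  | [x], merged => if x ≠ 0 ∧ merged = false then [x] else []
  | x :: y :: rest, merged =>
    if x ≠ 0 ∧ x = y ∧ merged = false then
      (x + 1) :: mergeLoopA (y :: rest) true
    else if x ≠ y ∧ merged = false then
      x :: mergeLoopA (y :: rest) false
    else if merged = true then
      mergeLoopA (y :: rest) false
    else
      mergeLoopA (y :: rest) merged

def mergeLine (line : List Int) : List Int :=
  let nonzeros_removed0 := line.filter (fun n => n ≠ 0)
  -- while len(nonzeros_removed) != len(line): append 0
  let nonzeros_removed := nonzeros_removed0 ++ List.replicate (line.length - nonzeros_removed0.length) 0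
  let result := mergeLoopA nonzeros_removed false
  -- while len(result) != len(nonzeros_removed): append 0
  result ++ List.replicate (nonzeros_removed.length - result.length) 0

-- ===== PORT B =====
-- itertools.groupby over the compacted tiles: list of (value, run length).
def runsB : List Int → List (Int × Nat)
  | [] => []
  | x :: xs =>
    (x, (xs.takeWhile (fun y => y == x)).length + 1) :: runsB (xs.dropWhile (fun y => y == x))
termination_by l => l.length
decreasing_by
  simpa using Nat.lt_succ_of_le (List.length_dropWhile_le _ _)

-- one group's contribution: k//2 merged tiles then k%2 originals
def emitB (v : Int) (k : Nat) : List Int :=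
  List.replicate (k / 2) (v + 1) ++ List.replicate (k % 2) v

def mergeLine_alt (line : List Int) : List Int :=
  let tiles := line.filter (fun x => x ≠ 0)
  let out := (runsB tiles).flatMap (fun p => emitB p.1 p.2)
  out ++ List.replicate (line.length - out.length) 0

-- ===== PRECONDITION & SPEC =====
-- Pre_ excludes only the empty line, on which A raises IndexError (it reads nonzeros_removed[-1] unconditionally); B returns [] there.
def Pre_mergeLine (line : List Int) : Prop := line ≠ []
instance (line : List Int) : Decidable (Pre_mergeLine line) := by unfold Pre_mergeLine; infer_instance

def pvWitness_mergeLine : List Int := [1, 1, 0, 2]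

def Spec_mergeLine (line : List Int) (out : List Int) : Prop := out = mergeLine_alt line
instance (line : List Int) (out : List Int) : Decidable (Spec_mergeLine line out) := by unfold Spec_mergeLine; infer_instance

-- ===== CLAIM (what is proved, stated in full; the proofs are below) =====
def Claim_equal_mergeLine : Prop := ∀ (line : List Int), Dom_mergeLine line → Pre_mergeLine line → Spec_mergeLine line (mergeLine line)

-- ===== LEMMAS AND PROOFS =====

def flatRunsB (xs : List Int) : List Int := (runsB xs).flatMap (fun p => emitB p.1 p.2)

theorem emitB_succ_succ (v : Int) (k : Nat) : emitB v (k + 2) = (v + 1) :: emitB v k := by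
  unfold emitB
  have h1 : (k + 2) / 2 = k / 2 + 1 := Nat.add_div_right k (by norm_num)
  have h2 : (k + 2) % 2 = k % 2 := Nat.add_mod_right k 2
  rw [h1, h2, List.replicate_succ]
  simp

theorem flatRunsB_nil : flatRunsB [] = [] := by simp [flatRunsB, runsB]

theorem flatRunsB_single (x : Int) : flatRunsB [x] = [x] := by
  simp [flatRunsB, runsB, emitB]

theorem flatRunsB_ne (x y : Int) (rest : List Int) (h : x ≠ y) :
    flatRunsB (x :: y :: rest) = x :: flatRunsB (y :: rest) := by
  unfold flatRunsB
  rw [runsB]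
  have hy : (y == x) = false := by simp; exact fun e => h e.symm
  simp [List.takeWhile, List.dropWhile, hy, emitB]

theorem flatRunsB_eq (x : Int) (rest : List Int) :
    flatRunsB (x :: x :: rest) = (x + 1) :: flatRunsB rest := by
  unfold flatRunsB
  rw [runsB]
  have htw : (x :: rest).takeWhile (fun y => y == x) = x :: rest.takeWhile (fun y => y == x) := by
    simp [List.takeWhile]
  have hdw : (x :: rest).dropWhile (fun y => y == x) = rest.dropWhile (fun y => y == x) := by
    simp [List.dropWhile]
  rw [htw, hdw]
  cases rest with
  | nil => simp [runsB, emitB]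
  | cons r rs =>
    by_cases hr : r = x
    · subst hr
      rw [runsB]
      have htw2 : (r :: rs).takeWhile (fun y => y == r) = r :: rs.takeWhile (fun y => y == r) := by
        simp [List.takeWhile]
      have hdw2 : (r :: rs).dropWhile (fun y => y == r) = rs.dropWhile (fun y => y == r) := by
        simp [List.dropWhile]
      rw [htw2, hdw2]
      simp only [List.flatMap_cons, List.length_cons]
      rw [show ((rs.takeWhile (fun y => y == r)).length + 1 + 1)
            = ((rs.takeWhile (fun y => y == r)).length + 1) + 1 from rfl]
      rw [emitB_succ_succ]
      simp
    · have hrx : (r == x) = false := by simp [hr]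
      have h2 : emitB x 2 = [x + 1] := by simp [emitB]
      simp [List.takeWhile, List.dropWhile, hrx, h2]

-- processing with merged = true skips exactly one element
theorem mergeLoopA_true (a : Int) (l : List Int) :
    mergeLoopA (a :: l) true = mergeLoopA l false := by
  cases l with
  | nil => simp [mergeLoopA]
  | cons c cs => simp [mergeLoopA]

-- zeros contribute nothing
-- zeros contribute nothing
theorem mergeLoopA_zeros (m : Nat) : mergeLoopA (List.replicate m 0) false = [] := by
  induction m with
  | zero => simp [mergeLoopA]
  | succ n ih =>
    cases n with
    | zero => simp [mergeLoopA]
    | succ n' =>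
      rw [show List.replicate (n' + 1 + 1) (0 : Int) = 0 :: 0 :: List.replicate n' (0 : Int) by
        simp [List.replicate_succ]]
      rw [mergeLoopA]
      norm_num
      rw [← List.replicate_succ]
      exact ih

-- core: on a zero-free prefix followed by zero padding, A's pass computes B's run decomposition
theorem mergeLoopA_eq_flatRuns (xs : List Int) (m : Nat)
    (hz : ∀ a ∈ xs, a ≠ 0) :
    mergeLoopA (xs ++ List.replicate m 0) false = flatRunsB xs := by
  match xs with
  | [] => simpa [flatRunsB_nil] using mergeLoopA_zeros m
  | [x] =>
    have hx : x ≠ 0 := hz x (by simp)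
    cases m with
    | zero => simp [mergeLoopA, hx, flatRunsB_single]
    | succ m' =>
      rw [show ([x] ++ List.replicate (m' + 1) 0) = x :: 0 :: List.replicate m' 0 by
        simp [List.replicate_succ]]
      rw [mergeLoopA, if_neg (by simp [hx]), if_pos (by simp [hx])]
      rw [show (0 :: List.replicate m' (0 : Int)) = List.replicate (m' + 1) (0 : Int) by
        simp [List.replicate_succ]]
      rw [mergeLoopA_zeros, flatRunsB_single]
  | x :: y :: t' =>
    have hx : x ≠ 0 := hz x (by simp)
    have hzt : ∀ a ∈ y :: t', a ≠ 0 := fun a ha => hz a (List.mem_cons_of_mem x ha)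
    by_cases hxy : x = y
    · subst hxy
      rw [show ((x :: x :: t') ++ List.replicate m 0) = x :: x :: (t' ++ List.replicate m 0) by
        simp]
      rw [mergeLoopA, if_pos (by simp [hx]), mergeLoopA_true]
      rw [mergeLoopA_eq_flatRuns t' m (fun a ha => hz a (by simp [ha])), flatRunsB_eq]
    · rw [show ((x :: y :: t') ++ List.replicate m 0) = x :: y :: (t' ++ List.replicate m 0) by
        simp]
      rw [mergeLoopA, if_neg (by simp [hxy]), if_pos (by simp [hxy])]
      have ih := mergeLoopA_eq_flatRuns (y :: t') m hzt
      rw [List.cons_append] at ih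
      rw [ih, flatRunsB_ne _ _ _ hxy]
termination_by xs.length

-- ===== VERDICT (by name: the statement is the Claim_ definition above) =====
theorem mergeLine_spec : Claim_equal_mergeLine := by
  intro line _ _
  unfold Spec_mergeLine mergeLine mergeLine_alt
  have hz : ∀ a ∈ line.filter (fun n => n ≠ 0), a ≠ 0 := by
    intro a ha
    simpa using List.of_mem_filter ha
  have hlen : (line.filter (fun n => n ≠ 0)).length ≤ line.length :=
    List.length_filter_le _ _
  have hpadlen : ∀ (l : List Int) (k : Nat), l.length ≤ k →
      (l ++ List.replicate (k - l.length) 0).length = k := by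
    intro l k h
    simp
    omega
  simp only []
  rw [mergeLoopA_eq_flatRuns _ _ hz]
  rw [hpadlen _ _ hlen]
  rfl
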